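-- pv_equiv track=rewrite | github.com/dinizgab/leetcode | 3160.py | queryResultON2
-- ===== SOURCE A (Python) =====
-- def queryResultON2(limit, queries):
--     ball_colors = {}
--     labels = []
--     res = []
--
--     for q in queries:
--         b = q[0]
--         lab = q[1]
--
--         if b in ball_colors:
--             labels.remove(ball_colors[b])  # O(n)
--
--         ball_colors[b] = lab
--         labels.append(lab)
--         res.append(len(set(labels)))  # O(n)
--
--     return res
-- ===== SOURCE B (Python) =====
-- def queryResultON2(limit, queries):
--     # O(1) per query: color of each ball, multiplicity of each color, running distinct count
--     color_of = {}
--     cnt = {}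
--     distinct = 0
--     res = []
--     for q in queries:
--         b = q[0]
--         lab = q[1]
--         old = color_of.get(b)
--         if old is not None:
--             cnt[old] -= 1
--             if cnt[old] == 0:
--                 distinct -= 1
--         color_of[b] = lab
--         cnt[lab] = cnt.get(lab, 0) + 1
--         if cnt[lab] == 1:
--             distinct += 1
--         res.append(distinct)
--     return res
-- ===== Notes on version B (the rewrite author's own statement) =====
-- stated objective: faster
-- what changed: Replaces the per-query O(n) labels-list remove and len(set(labels)) rescan with a color->multiplicity counter and a running distinct count updated in O(1) per query.
import Mathlib
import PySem

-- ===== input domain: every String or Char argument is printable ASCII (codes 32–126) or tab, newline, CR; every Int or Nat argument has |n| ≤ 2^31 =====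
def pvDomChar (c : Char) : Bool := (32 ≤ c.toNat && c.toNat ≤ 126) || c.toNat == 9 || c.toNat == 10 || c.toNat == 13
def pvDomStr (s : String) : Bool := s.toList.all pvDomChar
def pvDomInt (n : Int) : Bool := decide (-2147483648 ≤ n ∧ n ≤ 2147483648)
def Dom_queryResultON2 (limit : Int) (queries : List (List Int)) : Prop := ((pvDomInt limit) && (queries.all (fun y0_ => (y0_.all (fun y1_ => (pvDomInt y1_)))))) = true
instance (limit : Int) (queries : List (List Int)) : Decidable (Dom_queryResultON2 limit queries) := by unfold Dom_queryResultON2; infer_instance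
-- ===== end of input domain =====

-- B replaces A's per-query O(n) labels-list remove + len(set(labels)) rescan by a color-count
-- dictionary and a running distinct counter updated in O(1) per query (objective: faster).

-- ===== PORT A =====
-- one iteration of A's loop body; state = (ball_colors, labels, res)
def pvStepA (st : PySem.Dict Int Int × List Int × List Int) (q : List Int) :
    PySem.Dict Int Int × List Int × List Int :=
  match PySem.List.pyGet? q 0, PySem.List.pyGet? q 1 with
  | some b, some lab =>
      -- 'labels.remove(ball_colors[b])': the label is always present, so remove? is some;
      -- the .getD default is the unreachable ValueError branch.
      let labels1 := if st.1.contains b then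
          (PySem.List.remove? st.2.1 (st.1.getD b 0)).getD st.2.1
        else st.2.1
      let labels2 := labels1 ++ [lab]
      (st.1.insert b lab, labels2, st.2.2 ++ [((PySem.Set.ofList labels2).length : Int)])
  | _, _ => st   -- q[0]/q[1] IndexError: excluded by Pre_

def queryResultON2 (limit : Int) (queries : List (List Int)) : List Int :=
  (queries.foldl pvStepA (PySem.Dict.empty, [], [])).2.2

-- ===== PORT B =====
-- tail of B's loop body after the old-color decrement; state = (color_of, cnt, distinct, res)
def pvFinishB (color : PySem.Dict Int Int) (b lab : Int) (cnt1 : PySem.Dict Int Int)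
    (dist1 : Int) (res : List Int) :
    PySem.Dict Int Int × PySem.Dict Int Int × Int × List Int :=
  let cnt2 := cnt1.insert lab (cnt1.getD lab 0 + 1)
  let dist2 := if cnt2.getD lab 0 == 1 then dist1 + 1 else dist1
  (color.insert b lab, cnt2, dist2, res ++ [dist2])

def pvStepB (st : PySem.Dict Int Int × PySem.Dict Int Int × Int × List Int) (q : List Int) :
    PySem.Dict Int Int × PySem.Dict Int Int × Int × List Int :=
  match PySem.List.pyGet? q 0, PySem.List.pyGet? q 1 with
  | some b, some lab =>
      match st.1.get? b with
      | some old =>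
          let cnt1 := st.2.1.modify old 0 (· - 1)
          let dist1 := if cnt1.getD old 0 == 0 then st.2.2.1 - 1 else st.2.2.1
          pvFinishB st.1 b lab cnt1 dist1 st.2.2.2
      | none => pvFinishB st.1 b lab st.2.1 st.2.2.1 st.2.2.2
  | _, _ => st   -- q[0]/q[1] IndexError: excluded by Pre_

def queryResultON2_alt (limit : Int) (queries : List (List Int)) : List Int :=
  (queries.foldl pvStepB (PySem.Dict.empty, PySem.Dict.empty, 0, [])).2.2.2

-- ===== PRECONDITION & SPEC =====
-- A reads q[0] and q[1] of every query; a query with fewer than 2 entries raises IndexError.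
def Pre_queryResultON2 (limit : Int) (queries : List (List Int)) : Prop :=
  ∀ q ∈ queries, 2 ≤ q.length
instance (limit : Int) (queries : List (List Int)) : Decidable (Pre_queryResultON2 limit queries) := by
  unfold Pre_queryResultON2; infer_instance

def pvWitness_queryResultON2 : Int × List (List Int) := (4, [[1, 4], [2, 5], [1, 3], [3, 4]])

def Spec_queryResultON2 (limit : Int) (queries : List (List Int)) (out : List Int) : Prop :=
  out = queryResultON2_alt limit queries
instance (limit : Int) (queries : List (List Int)) (out : List Int) : Decidable (Spec_queryResultON2 limit queries out) := by
  unfold Spec_queryResultON2; infer_instance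

-- ===== CLAIM (what is proved, stated in full; the proofs are below) =====
def Claim_equal_queryResultON2 : Prop := ∀ (limit : Int) (queries : List (List Int)), Dom_queryResultON2 limit queries → Pre_queryResultON2 limit queries → Spec_queryResultON2 limit queries (queryResultON2 limit queries)

-- ===== LEMMAS AND PROOFS =====

-- counting distinct: len(set(l)) = l.toFinset.card
theorem pv_setLen_eq (l : List Int) :
    ((PySem.Set.ofList l).length : Int) = (l.toFinset.card : Int) := by
  have h1 : (PySem.Set.ofList l).toFinset = l.toFinset := by
    ext a; simp [List.mem_toFinset, PySem.Set.mem_ofList]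
  have h2 := List.toFinset_card_of_nodup (PySem.Set.nodup_ofList l)
  rw [← h2, h1]

theorem pv_count_erase_eq (l : List Int) (x c : Int) :
    (l.erase x).count c = l.count c - (if x = c then 1 else 0) := by
  have h : (l.erase x).count c = l.count c - if (x == c) then 1 else 0 := List.count_erase
  simpa [beq_iff_eq] using h

-- erasing one occurrence: the distinct count drops iff the occurrence was the last one
theorem pv_card_erase (l : List Int) (x : Int) (hx : x ∈ l) :
    ((l.erase x).toFinset.card : Int)
      = (l.toFinset.card : Int) - (if l.count x = 1 then 1 else 0) := by
  have hmem : x ∈ l.toFinset := List.mem_toFinset.mpr hx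
  have hpos : 1 ≤ l.toFinset.card := Finset.card_pos.mpr ⟨x, hmem⟩
  by_cases h1 : l.count x = 1
  · have hset : (l.erase x).toFinset = l.toFinset.erase x := by
      ext a
      simp only [List.mem_toFinset, Finset.mem_erase, ← List.count_pos_iff,
        pv_count_erase_eq]
      by_cases hax : x = a
      · subst hax; simp [h1]
      · simp [hax, Ne.symm hax]
    rw [hset, Finset.card_erase_of_mem hmem, if_pos h1]
    omega
  · have h2 : 2 ≤ l.count x := by
      have := List.count_pos_iff.mpr hx
      omega
    have hset : (l.erase x).toFinset = l.toFinset := by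
      ext a
      simp only [List.mem_toFinset, ← List.count_pos_iff, pv_count_erase_eq]
      by_cases hax : x = a
      · subst hax
        rw [if_pos rfl]
        omega
      · simp [hax]
    rw [hset, if_neg h1]
    simp

-- appending a label: the distinct count grows iff the label is new
theorem pv_card_append (l : List Int) (x : Int) :
    (((l ++ [x]).toFinset.card : Int))
      = (l.toFinset.card : Int) + (if l.count x = 0 then 1 else 0) := by
  have hset : (l ++ [x]).toFinset = insert x l.toFinset := by simp
  rw [hset]
  by_cases hx : x ∈ l
  · rw [Finset.insert_eq_of_mem (List.mem_toFinset.mpr hx)]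
    have hc : l.count x ≠ 0 := by
      have := List.count_pos_iff.mpr hx; omega
    simp [hc]
  · rw [Finset.card_insert_of_notMem (by simpa [List.mem_toFinset] using hx)]
    have hc : l.count x = 0 := by
      by_contra h
      exact hx (List.count_pos_iff.mp (by omega))
    simp [hc]

-- overwriting one entry of an association list with distinct keys: effect on value counts
theorem pv_beq_ite_eq (u v : Int) :
    (if u == v then (1 : Nat) else 0) = (if u = v then 1 else 0) := by
  simp [beq_iff_eq]

theorem pv_count_map_replace (ps : List (Int × Int)) (b old lab c : Int)
    (hnd : (ps.map (fun p => p.1)).Nodup) (hmem : (b, old) ∈ ps) :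
    ((ps.map (fun p => if p.1 == b then (b, lab) else p)).map (fun p => p.2)).count c
      + (if old = c then 1 else 0)
      = (ps.map (fun p => p.2)).count c + (if lab = c then 1 else 0) := by
  induction ps with
  | nil => simp at hmem
  | cons p rest ih =>
    simp only [List.map_cons, List.nodup_cons] at hnd
    by_cases hpb : p.1 = b
    · have hrest : b ∉ rest.map (fun p => p.1) := hpb ▸ hnd.1
      have hpo : p = (b, old) := by
        rcases List.mem_cons.mp hmem with h | h
        · exact h.symm
        · exact absurd (List.mem_map_of_mem h) hrest
      subst hpo
      have hmap : rest.map (fun p => if p.1 == b then (b, lab) else p) = rest := by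
        have hcg : ∀ a ∈ rest, (if a.1 == b then (b, lab) else a) = a := by
          intro a ha
          have hab : a.1 ≠ b := by
            intro h
            exact hrest (h ▸ List.mem_map_of_mem ha)
          simp [hab]
        calc rest.map (fun p => if p.1 == b then (b, lab) else p)
            = rest.map id := List.map_congr_left hcg
          _ = rest := List.map_id rest
      rw [show ((b, old) :: rest).map (fun p => if p.1 == b then (b, lab) else p)
            = (b, lab) :: rest from by rw [List.map_cons, hmap]; simp]
      simp only [List.map_cons, List.count_cons, pv_beq_ite_eq]
      omega
    · have hmem' : (b, old) ∈ rest := by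
        rcases List.mem_cons.mp hmem with h | h
        · exact absurd (congrArg Prod.fst h.symm) hpb
        · exact h
      have hih := ih hnd.2 hmem'
      have hhead : (if p.1 == b then (b, lab) else p) = p := by simp [hpb]
      simp only [List.map_cons, hhead, List.count_cons, pv_beq_ite_eq]
      omega

-- B's increment-and-test computes the new distinct count of labels ++ [lab]
theorem pv_dist_eq (labels : List Int) (cnt : PySem.Dict Int Int) (distinct lab : Int)
    (hclab : cnt.getD lab 0 = (labels.count lab : Int))
    (hdist : distinct = (labels.toFinset.card : Int)) :
    (if (cnt.insert lab (cnt.getD lab 0 + 1)).getD lab 0 == 1 then distinct + 1 else distinct)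
      = (((labels ++ [lab]).toFinset.card : Int)) := by
  rw [PySem.Dict.getD_insert, if_pos rfl, hclab, pv_card_append, hdist]
  by_cases hz : labels.count lab = 0
  · have hb : (((labels.count lab : Int) + 1) == 1) = true := by simp [hz]
    rw [hb]; simp [hz]
  · have hb : (((labels.count lab : Int) + 1) == 1) = false := by
      simp only [beq_eq_false_iff_ne, ne_eq]
      omega
    rw [hb]; simp [hz]

-- the joint loop invariant: same color dict; cnt holds the multiplicities of A's labels
-- list; distinct is the number of distinct labels; labels is the dict's value multiset
theorem pv_main_loop (queries : List (List Int))
    (hpre : ∀ q ∈ queries, 2 ≤ q.length)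
    (d cnt : PySem.Dict Int Int) (labels res : List Int) (distinct : Int)
    (hnd : d.keys.Nodup)
    (hval : ∀ c, labels.count c = d.values.count c)
    (hcnt : ∀ c, cnt.getD c 0 = (labels.count c : Int))
    (hdist : distinct = (labels.toFinset.card : Int)) :
    (queries.foldl pvStepA (d, labels, res)).2.2
      = (queries.foldl pvStepB (d, cnt, distinct, res)).2.2.2 := by
  induction queries generalizing d cnt labels res distinct with
  | nil => rfl
  | cons q qs ih =>
    have hq := hpre q (List.mem_cons_self ..)
    obtain ⟨b, lab, rest, rfl⟩ : ∃ b lab rest, q = b :: lab :: rest := by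
      cases q with
      | nil => simp at hq
      | cons b t =>
        cases t with
        | nil => simp at hq
        | cons lab rest => exact ⟨b, lab, rest, rfl⟩
    have hpre' : ∀ q ∈ qs, 2 ≤ q.length := fun q hq => hpre q (List.mem_cons_of_mem _ hq)
    have h0 : PySem.List.pyGet? (b :: lab :: rest) (0 : Int) = some b := by
      simpa using PySem.List.pyGet?_natCast (b :: lab :: rest) 0
    have h1 : PySem.List.pyGet? (b :: lab :: rest) (1 : Int) = some lab := by
      simpa using PySem.List.pyGet?_natCast (b :: lab :: rest) 1
    rw [List.foldl_cons, List.foldl_cons]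
    by_cases hb : d.contains b = true
    · -- ball b already colored: old label erased from labels / decremented in cnt
      obtain ⟨old, hget⟩ : ∃ old, d.get? b = some old := by
        rcases h : d.get? b with _ | old
        · rw [(PySem.Dict.get?_eq_none_iff_contains d b).mp h] at hb; cases hb
        · exact ⟨old, rfl⟩
      have hgetD : d.getD b 0 = old := by
        rw [PySem.Dict.getD_eq_get?_getD, hget]; rfl
      have hitems : (b, old) ∈ d.items := PySem.Dict.mem_items_of_get?_eq_some d hget
      have holdv : old ∈ d.values := List.mem_map_of_mem hitems
      have holdl : old ∈ labels := by
        have h2 := List.count_pos_iff.mpr holdv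
        have h3 := hval old
        exact List.count_pos_iff.mp (by omega)
      have hco := List.count_pos_iff.mpr holdl
      have hrem : PySem.List.remove? labels old = some (labels.erase old) :=
        PySem.List.remove?_eq_some_erase labels old holdl
      have hstepA : pvStepA (d, labels, res) (b :: lab :: rest)
          = (d.insert b lab, (labels.erase old) ++ [lab],
              res ++ [((((labels.erase old) ++ [lab]).toFinset.card : Int))]) := by
        simp [pvStepA, h0, h1, hb, hgetD, hrem, pv_setLen_eq]
      have hc1 : ∀ c, (cnt.modify old 0 (· - 1)).getD c 0
          = (((labels.erase old).count c : Int)) := by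
        intro c
        rw [PySem.Dict.getD_modify, pv_count_erase_eq]
        by_cases hoc : c = old
        · subst hoc
          rw [if_pos rfl, hcnt c]
          simp only [eq_self_iff_true, if_true]
          omega
        · have hoc' : old ≠ c := fun h => hoc h.symm
          rw [if_neg hoc, hcnt c]
          simp [hoc']
      have hd1 : (if (cnt.modify old 0 (· - 1)).getD old 0 == 0 then distinct - 1 else distinct)
          = (((labels.erase old).toFinset.card : Int)) := by
        rw [hc1 old, pv_card_erase labels old holdl, hdist]
        have he : (labels.erase old).count old = labels.count old - 1 := by
          rw [pv_count_erase_eq]; simp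
        rw [he]
        by_cases hone : labels.count old = 1
        · have hx : (((labels.count old - 1 : Nat) : Int) == 0) = true := by simp [hone]
          rw [hx]; simp [hone]
        · have hx : (((labels.count old - 1 : Nat) : Int) == 0) = false := by
            simp only [beq_eq_false_iff_ne, ne_eq]
            omega
          rw [hx]; simp [hone]
      have hstepB : pvStepB (d, cnt, distinct, res) (b :: lab :: rest)
          = (d.insert b lab,
             (cnt.modify old 0 (· - 1)).insert lab ((cnt.modify old 0 (· - 1)).getD lab 0 + 1),
             ((((labels.erase old) ++ [lab]).toFinset.card : Int)),
             res ++ [((((labels.erase old) ++ [lab]).toFinset.card : Int))]) := by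
        have hfin := pv_dist_eq (labels.erase old) (cnt.modify old 0 (· - 1))
            (if (cnt.modify old 0 (· - 1)).getD old 0 == 0 then distinct - 1 else distinct)
            lab (hc1 lab) hd1
        simp only [pvStepB, h0, h1, hget, pvFinishB, hfin]
      rw [hstepA, hstepB]
      apply ih hpre'
      · exact PySem.Dict.nodup_keys_insert d b lab hnd
      · intro c
        have hvins : (d.insert b lab).values
            = (d.items.map (fun p => if p.1 == b then (b, lab) else p)).map (fun p => p.2) := by
          simp [PySem.Dict.values, PySem.Dict.items_insert_of_contains d lab hb]
        have hrep := pv_count_map_replace d.items b old lab c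
          (by simpa [PySem.Dict.keys] using hnd) hitems
        have hvc : (d.items.map (fun p => p.2)).count c = d.values.count c := rfl
        rw [hvc, ← hval c] at hrep
        rw [hvins, List.count_append, pv_count_erase_eq]
        simp only [List.count_cons, List.count_nil, pv_beq_ite_eq, Nat.zero_add]
        by_cases hx1 : old = c
        · subst hx1
          rw [if_pos rfl] at hrep ⊢
          omega
        · rw [if_neg hx1] at hrep ⊢
          omega
      · intro c
        rw [PySem.Dict.getD_insert]
        by_cases hcl : c = lab
        · subst hcl
          rw [if_pos rfl, hc1 c]
          push_cast [List.count_append]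
          simp
        · have hcl' : lab ≠ c := fun h => hcl h.symm
          rw [if_neg hcl, hc1 c]
          simp [List.count_append, hcl']
      · rfl
    · -- new ball: nothing removed
      have hbf : d.contains b = false := by simpa using hb
      have hget : d.get? b = none := (PySem.Dict.get?_eq_none_iff_contains d b).mpr hbf
      have hstepA : pvStepA (d, labels, res) (b :: lab :: rest)
          = (d.insert b lab, labels ++ [lab],
              res ++ [(((labels ++ [lab]).toFinset.card : Int))]) := by
        simp [pvStepA, h0, h1, hb, pv_setLen_eq]
      have hstepB : pvStepB (d, cnt, distinct, res) (b :: lab :: rest)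
          = (d.insert b lab,
             cnt.insert lab (cnt.getD lab 0 + 1),
             (((labels ++ [lab]).toFinset.card : Int)),
             res ++ [(((labels ++ [lab]).toFinset.card : Int))]) := by
        have hfin := pv_dist_eq labels cnt distinct lab (hcnt lab) hdist
        simp only [pvStepB, h0, h1, hget, pvFinishB, hfin]
      rw [hstepA, hstepB]
      apply ih hpre'
      · exact PySem.Dict.nodup_keys_insert d b lab hnd
      · intro c
        have hvins : (d.insert b lab).values = d.values ++ [lab] := by
          simp [PySem.Dict.values, PySem.Dict.items_insert_of_not_contains d lab hbf]
        rw [hvins]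
        simp [List.count_append, hval c]
      · intro c
        rw [PySem.Dict.getD_insert]
        by_cases hcl : c = lab
        · subst hcl
          rw [if_pos rfl, hcnt c]
          push_cast [List.count_append]
          simp
        · have hcl' : lab ≠ c := fun h => hcl h.symm
          rw [if_neg hcl, hcnt c]
          simp [List.count_append, hcl']
      · rfl

-- ===== VERDICT (by name: the statement is the Claim_ definition above) =====
theorem queryResultON2_spec : Claim_equal_queryResultON2 := by
  intro limit queries _hdom hpre
  unfold Spec_queryResultON2 queryResultON2 queryResultON2_alt
  exact pv_main_loop queries hpre PySem.Dict.empty PySem.Dict.empty [] [] 0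
    (by simp) (fun c => rfl) (fun c => by simp) (by simp)
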